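-- pv_equiv track=rewrite | github.com/kirbykibble/midterm-python | students.py | is_fulltime
-- ===== SOURCE A (Python) =====
-- GR_DATA = [ "SN018569 BUS 172 Business 74 4",
--             "SN018569 CMP 101 Computational Logic 89 4",
--             "SN018569 CMP 102 Web Development 85 4",
--             "SN018569 CMP 151 Programming 1 (Java) 79 7",
--             "SN018569 ENG 101 Intro to Communications 66 4",
--             "SN018569 MTH 101 Discrete Mathematics 61 4",
--             "SN018569 PRJ 190 Practicum 81 6",
--             "SN018569 SKL 001 Study Skills P 1",
--             "SN415751 CMP 102 Web Development W 4",
--             "SN415751 CMP 104 Programming 1 (Python) 80 3",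
--             "SN415751 CMP 105 Programming 1 (Javascript) 21 3",
--             "SN415751 CMP 151 Programming 1 (Java) W 7",
--             "SN415751 MTH 101 Discrete Mathematics W 4",
--             "SN415751 PRJ 190 Practicum F 6",
--             "SN415751 SKL 001 Study Skills F 1"
--           ]
--
-- def is_fulltime(stu_id):
--     #initiates credit and course counts
--     credit_count = 0
--     course_count = 0
--
--     #iterates through the file and adds credits/course count accordingly
--     for items in GR_DATA:
--         items = items.split()
--         if (items[0] == stu_id):
--             course_count += 1
--             credit_count += int(items[-1])
--         else:
--             continue
--
--     #checks to make sure the course count and credit count are valid for fulltime status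
--     if (course_count >= 3) and (credit_count >= 15):
--         full_time = True
--     else:
--         full_time = False
--     return(full_time)
-- ===== SOURCE B (Python) =====
-- GR_DATA = [ "SN018569 BUS 172 Business 74 4",
--             "SN018569 CMP 101 Computational Logic 89 4",
--             "SN018569 CMP 102 Web Development 85 4",
--             "SN018569 CMP 151 Programming 1 (Java) 79 7",
--             "SN018569 ENG 101 Intro to Communications 66 4",
--             "SN018569 MTH 101 Discrete Mathematics 61 4",
--             "SN018569 PRJ 190 Practicum 81 6",
--             "SN018569 SKL 001 Study Skills P 1",
--             "SN415751 CMP 102 Web Development W 4",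
--             "SN415751 CMP 104 Programming 1 (Python) 80 3",
--             "SN415751 CMP 105 Programming 1 (Javascript) 21 3",
--             "SN415751 CMP 151 Programming 1 (Java) W 7",
--             "SN415751 MTH 101 Discrete Mathematics W 4",
--             "SN415751 PRJ 190 Practicum F 6",
--             "SN415751 SKL 001 Study Skills F 1"
--           ]
--
-- def is_fulltime(stu_id):
--     # group-by: one pass building an index over ALL students, then a lookup
--     tally = {}
--     for row in GR_DATA:
--         toks = row.split()
--         count, credits = tally.get(toks[0], (0, 0))
--         tally[toks[0]] = (count + 1, credits + int(toks[-1]))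
--     count, credits = tally.get(stu_id, (0, 0))
--     return count >= 3 and credits >= 15
-- ===== Notes on version B (the rewrite author's own statement) =====
-- stated objective: alternative
-- what changed: Replaces A's filter-during-scan (count only rows matching stu_id) with a group-by pass that builds a dict index of (course_count, credit_total) for every student id, followed by a single lookup with a (0,0) default.
import Mathlib
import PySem

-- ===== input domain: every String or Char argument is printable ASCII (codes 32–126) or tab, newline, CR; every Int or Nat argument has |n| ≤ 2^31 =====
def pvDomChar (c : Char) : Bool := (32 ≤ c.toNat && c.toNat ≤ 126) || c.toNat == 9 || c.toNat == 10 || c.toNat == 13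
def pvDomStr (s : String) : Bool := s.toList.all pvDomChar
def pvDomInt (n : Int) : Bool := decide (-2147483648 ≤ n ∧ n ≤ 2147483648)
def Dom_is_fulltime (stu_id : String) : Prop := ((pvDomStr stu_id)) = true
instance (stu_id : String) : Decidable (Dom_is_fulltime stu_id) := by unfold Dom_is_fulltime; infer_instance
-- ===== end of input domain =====

-- B replaces A's filter-during-scan with a group-by index over all students built in
-- one pass, then a single lookup (objective: alternative decomposition, same cost).

def GR_DATA : List String :=
  [ "SN018569 BUS 172 Business 74 4",
    "SN018569 CMP 101 Computational Logic 89 4",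
    "SN018569 CMP 102 Web Development 85 4",
    "SN018569 CMP 151 Programming 1 (Java) 79 7",
    "SN018569 ENG 101 Intro to Communications 66 4",
    "SN018569 MTH 101 Discrete Mathematics 61 4",
    "SN018569 PRJ 190 Practicum 81 6",
    "SN018569 SKL 001 Study Skills P 1",
    "SN415751 CMP 102 Web Development W 4",
    "SN415751 CMP 104 Programming 1 (Python) 80 3",
    "SN415751 CMP 105 Programming 1 (Javascript) 21 3",
    "SN415751 CMP 151 Programming 1 (Java) W 7",
    "SN415751 MTH 101 Discrete Mathematics W 4",
    "SN415751 PRJ 190 Practicum F 6",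
    "SN415751 SKL 001 Study Skills F 1" ]

-- ===== PORT A =====
-- items[0] / items[-1] of the split; the `none` fallthroughs are totalizing guards for
-- cases Python would raise on — unreachable on the fixed GR_DATA rows (all split to
-- ≥ 2 tokens with an integer last token).
def pvTok0 (row : String) : Option String := PySem.List.pyGet? (PySem.Str.split₀ row) 0
def pvTokLast (row : String) : Option String := PySem.List.pyGet? (PySem.Str.split₀ row) (-1)

-- one iteration of A's for-loop: state = (course_count, credit_count)
def pvRowA (stu_id : String) (acc : Int × Int) (row : String) : Int × Int :=
  match pvTok0 row with
  | none => acc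
  | some t0 =>
    if t0 == stu_id then
      match pvTokLast row with
      | none => acc
      | some tl => (acc.1 + 1, acc.2 + (PySem.Int.ofStr? tl).getD 0)
    else acc

def is_fulltime (stu_id : String) : Bool :=
  let r := GR_DATA.foldl (pvRowA stu_id) (0, 0)
  if r.1 ≥ 3 ∧ r.2 ≥ 15 then true else false

-- ===== PORT B =====
-- one iteration of B's index-building loop (accumulates for EVERY student id)
def pvRowB (d : PySem.Dict String (Int × Int)) (row : String) : PySem.Dict String (Int × Int) :=
  match pvTok0 row, pvTokLast row with
  | some t0, some tl =>
      let p := d.getD t0 (0, 0)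
      d.insert t0 (p.1 + 1, p.2 + (PySem.Int.ofStr? tl).getD 0)
  | _, _ => d

def pvTally : PySem.Dict String (Int × Int) :=
  GR_DATA.foldl pvRowB PySem.Dict.empty

def is_fulltime_alt (stu_id : String) : Bool :=
  let p := pvTally.getD stu_id (0, 0)
  decide (p.1 ≥ 3 ∧ p.2 ≥ 15)

-- ===== PRECONDITION & SPEC =====
def Spec_is_fulltime (stu_id : String) (out : Bool) : Prop := out = is_fulltime_alt stu_id
instance (stu_id : String) (out : Bool) : Decidable (Spec_is_fulltime stu_id out) := by unfold Spec_is_fulltime; infer_instance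

-- ===== CLAIM (what is proved, stated in full; the proofs are below) =====
def Claim_equal_is_fulltime : Prop := ∀ (stu_id : String), Dom_is_fulltime stu_id → Spec_is_fulltime stu_id (is_fulltime stu_id)

-- ===== LEMMAS AND PROOFS =====

-- every row of the fixed data belongs to one of the two students
theorem pvTok0_mem : ∀ r ∈ GR_DATA, pvTok0 r = some "SN018569" ∨ pvTok0 r = some "SN415751" := by
  decide

-- A's loop body skips a row whose first token is not stu_id
theorem pvRowA_skip (s : String) (acc : Int × Int) (row t0 : String)
    (h : pvTok0 row = some t0) (hne : t0 ≠ s) : pvRowA s acc row = acc := by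
  simp [pvRowA, h, hne]

theorem pvFoldl_id {α β : Type} (f : α → β → α) (l : List β) (init : α)
    (h : ∀ a, ∀ b ∈ l, f a b = a) : l.foldl f init = init := by
  induction l generalizing init with
  | nil => rfl
  | cons b t ih =>
      rw [List.foldl_cons, h init b (List.mem_cons_self ..)]
      exact ih init (fun a b' hb' => h a b' (List.mem_cons_of_mem _ hb'))

-- the constant group-by index B builds
theorem pvTally_eval :
    pvTally = PySem.Dict.mk [("SN018569", (8, 34)), ("SN415751", (7, 28))] := by
  decide

theorem pv_other (s : String) (h1 : s ≠ "SN018569") (h2 : s ≠ "SN415751") :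
    is_fulltime s = is_fulltime_alt s := by
  have hA : GR_DATA.foldl (pvRowA s) (0, 0) = ((0 : Int), (0 : Int)) := by
    refine pvFoldl_id _ _ _ (fun a r hr => ?_)
    rcases pvTok0_mem r hr with h | h
    · exact pvRowA_skip s a r _ h (Ne.symm h1)
    · exact pvRowA_skip s a r _ h (Ne.symm h2)
  have hB : pvTally.getD s (0, 0) = ((0 : Int), (0 : Int)) := by
    rw [pvTally_eval]
    simp [PySem.Dict.getD, PySem.Dict.get?_mk_cons, PySem.Dict.get?, Ne.symm h1, Ne.symm h2]
  simp [is_fulltime, is_fulltime_alt, hA, hB]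

-- ===== VERDICT (by name: the statement is the Claim_ definition above) =====
theorem is_fulltime_spec : Claim_equal_is_fulltime := by
  intro s _
  unfold Spec_is_fulltime
  by_cases h1 : s = "SN018569"
  · subst h1; decide
  · by_cases h2 : s = "SN415751"
    · subst h2; decide
    · exact pv_other s h1 h2
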